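-- pv_equiv track=rewrite | github.com/SRINIVASANLVC/LVCMATHIDEAS | primes/prime_chain_pairing3.py | build_linked_chains
-- ===== SOURCE A (Python) =====
-- def build_linked_chains(triplets):
--     chains = []
--     while triplets:
--         chain = {}
--         current = triplets.pop(0)
--         fraction, first_two, next_two = current
--         chain[fraction] = {'first': first_two, 'next': next_two}
--
--         while True:
--             match = next((t for t in triplets if t[1] == next_two), None)
--             if match:
--                 triplets.remove(match)
--                 fraction, first_two, next_two = match
--                 chain[fraction] = {'first': first_two, 'next': next_two}
--             else:
--                 break
--         chains.append(chain)
--     return chains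
-- ===== SOURCE B (Python) =====
-- def build_linked_chains(triplets):
--     # Index once: first_two -> list of positions, consumed via a per-key cursor.
--     # Unlike A, this does not mutate the input list (A pops it empty); return value is identical.
--     n = len(triplets)
--     buckets = {}
--     for i, (_, first_two, _) in enumerate(triplets):
--         buckets.setdefault(first_two, []).append(i)
--     pos = {key: 0 for key in buckets}
--     used = [False] * n
--
--     def take(key):
--         lst = buckets.get(key)
--         if lst is None:
--             return None
--         p = pos[key]
--         while p < len(lst) and used[lst[p]]:
--             p += 1
--         if p == len(lst):
--             pos[key] = p
--             return None
--         pos[key] = p + 1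
--         used[lst[p]] = True
--         return lst[p]
--
--     chains = []
--     for i in range(n):
--         if used[i]:
--             continue
--         used[i] = True
--         fraction, first_two, next_two = triplets[i]
--         chain = {fraction: {'first': first_two, 'next': next_two}}
--         while True:
--             j = take(next_two)
--             if j is None:
--                 break
--             fraction, first_two, next_two = triplets[j]
--             chain[fraction] = {'first': first_two, 'next': next_two}
--         chains.append(chain)
--     return chains
-- ===== Notes on version B (the rewrite author's own statement) =====
-- stated objective: alternative
-- what changed: A repeatedly rescans and mutates the remaining-triplets list (pop(0), a generator scan and list.remove per link); B instead builds a hash index first_two -> ordered list of positions once, consumes matches via per-key cursors over a used-flags array, and walks the original order for chain seeds, so the per-link scan over all remaining triplets disappears (worst-case O(n) vs A's O(n^2), though on random inputs the measured times are comparable).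
import Mathlib
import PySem

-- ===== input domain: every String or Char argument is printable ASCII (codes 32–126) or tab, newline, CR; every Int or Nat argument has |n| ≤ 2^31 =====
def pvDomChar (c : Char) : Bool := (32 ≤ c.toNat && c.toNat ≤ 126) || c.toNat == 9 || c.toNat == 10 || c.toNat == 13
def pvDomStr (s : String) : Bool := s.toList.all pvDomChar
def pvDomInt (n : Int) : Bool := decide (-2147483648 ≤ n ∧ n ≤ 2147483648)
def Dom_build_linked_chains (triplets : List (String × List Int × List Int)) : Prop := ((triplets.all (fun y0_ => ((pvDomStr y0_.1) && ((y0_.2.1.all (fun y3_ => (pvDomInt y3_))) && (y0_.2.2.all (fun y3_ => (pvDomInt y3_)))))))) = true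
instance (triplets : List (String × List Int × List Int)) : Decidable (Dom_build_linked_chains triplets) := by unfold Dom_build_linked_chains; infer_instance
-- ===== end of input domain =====

-- B re-implements A with a one-pass hash index (first_two → ordered positions, consumed via cursors)
-- instead of A's repeated linear scan-and-remove; return values are identical. NOTE: A empties the
-- input list in place (pop/remove); B does not mutate it — the equivalence proved here is about the
-- return value only.

abbrev pvT : Type := String × List Int × List Int
abbrev pvChain : Type := PySem.Dict String (List (String × List Int))

-- {'first': first_two, 'next': next_two}
def pvEntry (t : pvT) : List (String × List Int) := [("first", t.2.1), ("next", t.2.2)]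

-- ===== PORT A =====
-- inner `while True`: find first remaining triplet whose first_two == next_two, remove it
def pvInnerA (chain : pvChain) (next_two : List Int) (ts : List pvT) : pvChain × List pvT :=
  match h : ts.find? (fun t => t.2.1 == next_two) with
  | none => (chain, ts)
  | some m =>
    let ts' := (PySem.List.remove? ts m).getD ts
    have hm : m ∈ ts := List.mem_of_find?_eq_some h
    have : ts'.length < ts.length := by
      have h1 := PySem.List.remove?_eq_some_erase ts m hm
      have h2 := List.length_erase_of_mem hm
      have h3 : 0 < ts.length := List.length_pos_of_mem hm
      simp only [ts', h1, Option.getD_some]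
      omega
    pvInnerA (chain.insert m.1 (pvEntry m)) m.2.2 ts'
termination_by ts.length

theorem pvInnerA_snd_le (chain : pvChain) (next_two : List Int) (ts : List pvT) :
    (pvInnerA chain next_two ts).2.length ≤ ts.length := by
  fun_induction pvInnerA with
  | case1 => simp
  | case2 chain next_two ts m h ts' hm hlt ih => omega

-- outer `while triplets`: pop(0) seeds a chain, then the inner loop
def pvOuterA (ts : List pvT) : List (List (String × List (String × List Int))) :=
  match ts with
  | [] => []
  | c :: rest =>
    let st := pvInnerA ((PySem.Dict.empty).insert c.1 (pvEntry c)) c.2.2 rest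
    st.1.items :: pvOuterA st.2
termination_by ts.length
decreasing_by
  have := pvInnerA_snd_le ((PySem.Dict.empty).insert c.1 (pvEntry c)) c.2.2 rest
  simp only [List.length_cons]
  omega

def build_linked_chains (triplets : List (String × List Int × List Int)) : List (List (String × List (String × List Int))) :=
  pvOuterA triplets

-- ===== PORT B =====
-- buckets: first_two -> ordered list of positions (setdefault/append loop over enumerate(triplets))
def pvBuckets (ts : List pvT) : PySem.Dict (List Int) (List Nat) :=
  (ts.zipIdx.map (fun p => (p.1.2.1, p.2))).foldl
    (fun d p => d.modify p.1 [] (fun l => l ++ [p.2])) PySem.Dict.empty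

-- pos = {key: 0 for key in buckets}
def pvPos0 (buckets : PySem.Dict (List Int) (List Nat)) : PySem.Dict (List Int) Nat :=
  buckets.keys.foldl (fun d k => d.insert k 0) PySem.Dict.empty

-- `while p < len(lst) and used[lst[p]]: p += 1`  (getD is exact: bucket entries are valid indices)
def pvSkip (used : List Bool) (lst : List Nat) (p : Nat) : Nat :=
  if h : p < lst.length then
    if used.getD lst[p] false then pvSkip used lst (p + 1) else p
  else p
termination_by lst.length - p

-- def take(key): ...
def pvTake (buckets : PySem.Dict (List Int) (List Nat)) (pos : PySem.Dict (List Int) Nat)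
    (used : List Bool) (key : List Int) : Option Nat × PySem.Dict (List Int) Nat × List Bool :=
  match buckets.get? key with
  | none => (none, pos, used)
  | some lst =>
    let p := pvSkip used lst (pos.getD key 0)
    if h : p < lst.length then (some lst[p], pos.insert key (p + 1), used.set lst[p] true)
    else (none, pos.insert key p, used)

-- inner `while True` around take; fuel = len(triplets) only makes the recursion total:
-- each successful take marks one fresh position used, so the loop runs at most len(triplets) times
def pvInnerB (ts : List pvT) (buckets : PySem.Dict (List Int) (List Nat)) :
    Nat → pvChain → List Int → PySem.Dict (List Int) Nat → List Bool →
    pvChain × PySem.Dict (List Int) Nat × List Bool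
  | 0, chain, _, pos, used => (chain, pos, used)
  | fuel + 1, chain, key, pos, used =>
    match pvTake buckets pos used key with
    | (none, pos', used') => (chain, pos', used')
    | (some j, pos', used') =>
      let t := ts.getD j ("", [], [])
      pvInnerB ts buckets fuel (chain.insert t.1 (pvEntry t)) t.2.2 pos' used'

-- `for i in range(n): if used[i]: continue; ...` as an index loop
def pvOuterB (ts : List pvT) (buckets : PySem.Dict (List Int) (List Nat)) (i : Nat)
    (pos : PySem.Dict (List Int) Nat) (used : List Bool)
    (chains : List (List (String × List (String × List Int)))) :
    List (List (String × List (String × List Int))) :=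
  if h : i < ts.length then
    if used.getD i false then pvOuterB ts buckets (i + 1) pos used chains
    else
      let t := ts[i]
      let st := pvInnerB ts buckets ts.length
        ((PySem.Dict.empty).insert t.1 (pvEntry t)) t.2.2 pos (used.set i true)
      pvOuterB ts buckets (i + 1) st.2.1 st.2.2 (chains ++ [st.1.items])
  else chains
termination_by ts.length - i

def build_linked_chains_alt (triplets : List (String × List Int × List Int)) : List (List (String × List (String × List Int))) :=
  let buckets := pvBuckets triplets
  pvOuterB triplets buckets 0 (pvPos0 buckets) (List.replicate triplets.length false) []

-- ===== PRECONDITION & SPEC =====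
def Spec_build_linked_chains (triplets : List (String × List Int × List Int)) (out : List (List (String × List (String × List Int)))) : Prop := out = build_linked_chains_alt triplets
instance (triplets : List (String × List Int × List Int)) (out : List (List (String × List (String × List Int)))) : Decidable (Spec_build_linked_chains triplets out) := by unfold Spec_build_linked_chains; infer_instance

-- ===== CLAIM (what is proved, stated in full; the proofs are below) =====
def Claim_equal_build_linked_chains : Prop := ∀ (triplets : List (String × List Int × List Int)), Dom_build_linked_chains triplets → Spec_build_linked_chains triplets (build_linked_chains triplets)

-- ===== LEMMAS AND PROOFS =====

-- the triplets still unconsumed (A's mutable `triplets` list), read off B's `used` array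
def pvRem (ts : List pvT) (used : List Bool) : List pvT :=
  (ts.zipIdx.filter (fun p => !used.getD p.2 false)).map Prod.fst

-- what bucket `key` holds: the positions of the triplets with first_two = key, in order
def pvBkt (ts : List pvT) (key : List Int) : List Nat :=
  (ts.zipIdx.filter (fun p => p.1.2.1 == key)).map Prod.snd

-- cursor invariant: every bucket position below the cursor is already consumed
def pvPosInv (ts : List pvT) (pos : PySem.Dict (List Int) Nat) (used : List Bool) : Prop :=
  ∀ key : List Int, pos.getD key 0 ≤ (pvBkt ts key).length ∧
    ∀ q, (hq : q < (pvBkt ts key).length) → q < pos.getD key 0 →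
      used.getD (pvBkt ts key)[q] false = true

theorem pvBuckets_getD (ts : List pvT) (key : List Int) :
    (pvBuckets ts).getD key [] = pvBkt ts key := by
  unfold pvBuckets pvBkt
  rw [PySem.Dict.getD_foldl_modify_append]
  simp [List.filter_map, Function.comp_def]

theorem pvFoldInsert0 (key : List Int) (l : List (List Int)) (d : PySem.Dict (List Int) Nat)
    (h : ∀ k, d.getD k 0 = 0) :
    (l.foldl (fun d k => d.insert k 0) d).getD key 0 = 0 := by
  induction l generalizing d with
  | nil => exact h key
  | cons a l ih =>
    apply ih
    intro k
    by_cases hk : k = a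
    · subst hk; exact PySem.Dict.getD_insert_self d k 0 0
    · rw [PySem.Dict.getD_insert_of_ne d 0 0 hk]; exact h k

theorem pvPos0_getD (b : PySem.Dict (List Int) (List Nat)) (key : List Int) :
    (pvPos0 b).getD key 0 = 0 := by
  unfold pvPos0
  exact pvFoldInsert0 key b.keys PySem.Dict.empty (fun k => PySem.Dict.getD_empty k 0)

theorem pvSkip_spec (used : List Bool) (lst : List Nat) (p : Nat)
    (hple : p ≤ lst.length)
    (hpre : ∀ q, (hq : q < lst.length) → q < p → used.getD lst[q] false = true) :
    pvSkip used lst p ≤ lst.length ∧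
    (∀ q, (hq : q < lst.length) → q < pvSkip used lst p → used.getD lst[q] false = true) ∧
    (if h : pvSkip used lst p < lst.length
      then lst.find? (fun j => !used.getD j false) = some lst[pvSkip used lst p] ∧
           used.getD lst[pvSkip used lst p] false = false
      else lst.find? (fun j => !used.getD j false) = none) := by
  obtain ⟨k, hk⟩ : ∃ k, lst.length - p = k := ⟨_, rfl⟩
  induction k generalizing p with
  | zero =>
    have hpe : p = lst.length := by omega
    have hs : pvSkip used lst p = p := by rw [pvSkip]; simp [hpe]
    rw [hs]
    refine ⟨by omega, hpre, ?_⟩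
    rw [dif_neg (by omega)]
    rw [List.find?_eq_none]
    intro x hx
    obtain ⟨q, hq, rfl⟩ := List.mem_iff_getElem.mp hx
    have h := hpre q hq (by omega)
    simp only [List.getD_eq_getElem?_getD] at h
    simp [h]
  | succ k ih =>
    have hplt : p < lst.length := by omega
    by_cases hused : used.getD lst[p] false = true
    · have hused' := hused
      simp only [List.getD_eq_getElem?_getD] at hused'
      have hs : pvSkip used lst p = pvSkip used lst (p + 1) := by
        conv_lhs => rw [pvSkip]
        simp [hplt, hused']
      rw [hs]
      exact ih (p + 1) (by omega)
        (fun q hq hlt => by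
          rcases Nat.lt_or_ge q p with h | h
          · exact hpre q hq h
          · have : q = p := by omega
            subst this; exact hused)
        (by omega)
    · have hufalse : used.getD lst[p] false = false := by
        cases h : used.getD lst[p] false <;> simp_all
      have hufalse' := hufalse
      simp only [List.getD_eq_getElem?_getD] at hufalse'
      have hs : pvSkip used lst p = p := by
        conv_lhs => rw [pvSkip]
        simp [hplt, hufalse']
      rw [hs]
      refine ⟨by omega, hpre, ?_⟩
      rw [dif_pos hplt]
      refine ⟨?_, hufalse⟩
      have hsplit : lst = lst.take p ++ lst[p] :: lst.drop (p + 1) := by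
        conv_lhs => rw [← List.take_append_drop p lst]
        rw [List.drop_eq_getElem_cons hplt]
      conv_lhs => rw [hsplit]
      rw [List.find?_append]
      have h1 : (lst.take p).find? (fun j => !used.getD j false) = none := by
        rw [List.find?_eq_none]
        intro x hx
        obtain ⟨q, hq, rfl⟩ := List.mem_iff_getElem.mp hx
        have hq' : q < lst.length := by
          have := List.length_take_le p lst; omega
        rw [List.getElem_take]
        have h := hpre q hq' (by have := hq; simp at this; omega)
        simp only [List.getD_eq_getElem?_getD] at h
        simp [h]
      rw [h1, List.find?_cons_of_pos (p := fun j => !used.getD j false) (by simp [hufalse'])]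
      simp

theorem pvGetD_set_mono (used : List Bool) (j x : Nat)
    (h : used.getD x false = true) : (used.set j true).getD x false = true := by
  simp only [List.getD_eq_getElem?_getD, List.getElem?_set] at *
  split_ifs at * <;> simp_all

theorem pvBkt_mem_lt (ts : List pvT) (key : List Int) (j : Nat) (h : j ∈ pvBkt ts key) :
    j < ts.length := by
  unfold pvBkt at h
  simp only [List.mem_map] at h
  obtain ⟨p, hp, hpj⟩ := h
  have hmem := List.mem_of_mem_filter hp
  have := List.mem_zipIdx (x := p.1) (i := p.2) (by simpa using hmem)
  omega

theorem pvTake_spec (ts : List pvT) (pos : PySem.Dict (List Int) Nat) (used : List Bool)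
    (key : List Int) (hinv : pvPosInv ts pos used) (hlen : used.length = ts.length) :
    (match (pvBkt ts key).find? (fun j => !used.getD j false) with
      | none => pvTake (pvBuckets ts) pos used key = (none, (pvTake (pvBuckets ts) pos used key).2.1, used) ∧
                pvPosInv ts (pvTake (pvBuckets ts) pos used key).2.1 used
      | some j => pvTake (pvBuckets ts) pos used key = (some j, (pvTake (pvBuckets ts) pos used key).2.1, used.set j true) ∧
                used.getD j false = false ∧
                pvPosInv ts (pvTake (pvBuckets ts) pos used key).2.1 (used.set j true)) := by
  have hbkt := pvBuckets_getD ts key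
  cases hget : (pvBuckets ts).get? key with
  | none =>
    have hempty : pvBkt ts key = [] := by
      rw [← hbkt]; exact PySem.Dict.getD_of_get?_eq_none _ _ hget
    rw [hempty]
    simp only [List.find?_nil]
    refine ⟨by simp [pvTake, hget], ?_⟩
    simpa [pvTake, hget] using hinv
  | some lst =>
    have hlst : lst = pvBkt ts key := by
      rw [← hbkt]; exact (PySem.Dict.getD_of_get?_eq_some _ _ hget).symm
    subst hlst
    obtain ⟨hle, hprefix⟩ := hinv key
    obtain ⟨hrle, hrpre, hrfind⟩ :=
      pvSkip_spec used (pvBkt ts key) (pos.getD key 0) hle (fun q hq hlt => hprefix q hq hlt)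
    by_cases hr : pvSkip used (pvBkt ts key) (pos.getD key 0) < (pvBkt ts key).length
    · rw [dif_pos hr] at hrfind
      obtain ⟨hfind, hunused⟩ := hrfind
      rw [hfind]
      have hjlt : (pvBkt ts key)[pvSkip used (pvBkt ts key) (pos.getD key 0)] < used.length := by
        rw [hlen]
        exact pvBkt_mem_lt ts key _ (List.getElem_mem hr)
      refine ⟨by simp [pvTake, hget, dif_pos hr], hunused, ?_⟩
      have htake21 : (pvTake (pvBuckets ts) pos used key).2.1
          = pos.insert key (pvSkip used (pvBkt ts key) (pos.getD key 0) + 1) := by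
        simp [pvTake, hget, dif_pos hr]
      rw [htake21]
      intro k'
      by_cases hk : k' = key
      · subst hk
        rw [PySem.Dict.getD_insert_self]
        refine ⟨by omega, ?_⟩
        intro q hq hlt
        rcases Nat.lt_or_ge q (pvSkip used (pvBkt ts k') (pos.getD k' 0)) with h | h
        · exact pvGetD_set_mono used _ _ (hrpre q hq h)
        · have hq' : q = pvSkip used (pvBkt ts k') (pos.getD k' 0) := by omega
          subst hq'
          simp [List.getD_eq_getElem?_getD, hjlt]
      · rw [PySem.Dict.getD_insert_of_ne pos _ 0 hk]
        obtain ⟨h1, h2⟩ := hinv k'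
        exact ⟨h1, fun q hq hlt => pvGetD_set_mono used _ _ (h2 q hq hlt)⟩
    · rw [dif_neg hr] at hrfind
      rw [hrfind]
      refine ⟨by simp [pvTake, hget, dif_neg hr], ?_⟩
      have htake21 : (pvTake (pvBuckets ts) pos used key).2.1
          = pos.insert key (pvSkip used (pvBkt ts key) (pos.getD key 0)) := by
        simp [pvTake, hget, dif_neg hr]
      rw [htake21]
      intro k'
      by_cases hk : k' = key
      · subst hk
        rw [PySem.Dict.getD_insert_self]
        exact ⟨hrle, hrpre⟩
      · rw [PySem.Dict.getD_insert_of_ne pos _ 0 hk]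
        exact hinv k'

theorem pvFind_rem (ts : List pvT) (used : List Bool) (key : List Int) :
    (pvRem ts used).find? (fun t => t.2.1 == key) =
      (ts.zipIdx.find? (fun p => (!used.getD p.2 false) && (p.1.2.1 == key))).map Prod.fst := by
  unfold pvRem
  rw [List.find?_map, List.find?_filter]
  refine congrArg (Option.map Prod.fst) (congrArg₂ List.find? ?_ rfl)
  funext p
  simp [beq_eq_decide]

theorem pvFind_bkt (ts : List pvT) (used : List Bool) (key : List Int) :
    (pvBkt ts key).find? (fun j => !used.getD j false) =
      (ts.zipIdx.find? (fun p => (!used.getD p.2 false) && (p.1.2.1 == key))).map Prod.snd := by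
  unfold pvBkt
  rw [List.find?_map, List.find?_filter]
  refine congrArg (Option.map Prod.snd) (congrArg₂ List.find? ?_ rfl)
  funext p
  simp [Bool.and_comm, beq_eq_decide]

theorem pvSeed (used : List Bool) (P : List (pvT × Nat)) (p0 : pvT × Nat)
    (hf : P.find? (fun p => !used.getD p.2 false) = some p0)
    (hlt : p0.2 < used.length) (hnd : (P.map Prod.snd).Nodup) :
    (P.filter (fun p => !used.getD p.2 false)).map Prod.fst
      = p0.1 :: (P.filter (fun p => !(used.set p0.2 true).getD p.2 false)).map Prod.fst := by
  induction P with
  | nil => simp at hf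
  | cons p P ih =>
    simp only [List.map_cons, List.nodup_cons] at hnd
    by_cases hp : (!used.getD p.2 false) = true
    · rw [List.find?_cons_of_pos (p := fun q : pvT × Nat => !used.getD q.2 false) hp] at hf
      obtain rfl := Option.some.inj hf
      rw [List.filter_cons_of_pos (p := fun q : pvT × Nat => !used.getD q.2 false) hp,
        List.filter_cons_of_neg (p := fun q : pvT × Nat => !(used.set p.2 true).getD q.2 false)
        (by simp [List.getD_eq_getElem?_getD, hlt])]
      have htail : List.filter (fun q => !(used.set p.2 true).getD q.2 false) P
          = List.filter (fun q => !used.getD q.2 false) P := by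
        apply List.filter_congr
        intro q hq
        have hne : p.2 ≠ q.2 := fun h => hnd.1 (h ▸ List.mem_map_of_mem hq)
        simp [List.getD_eq_getElem?_getD, hne]
      rw [htail, List.map_cons]
    · rw [List.find?_cons_of_neg (p := fun q : pvT × Nat => !used.getD q.2 false) hp] at hf
      have hmem := List.mem_of_find?_eq_some hf
      have hne : p0.2 ≠ p.2 := fun h => hnd.1 (h ▸ List.mem_map_of_mem hmem)
      have hp2 : (!(used.set p0.2 true).getD p.2 false) = false := by
        simp only [List.getD_eq_getElem?_getD, List.getElem?_set, if_neg hne]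
        simpa using hp
      simp only [List.getD_eq_getElem?_getD] at hp2
      rw [List.filter_cons_of_neg (p := fun q : pvT × Nat => !used.getD q.2 false) hp,
        List.filter_cons_of_neg (p := fun q : pvT × Nat => !(used.set p0.2 true).getD q.2 false)
        (by simp; simpa using hp2)]
      exact ih hf hnd.2

theorem pvErase (used : List Bool) (key : List Int) (P : List (pvT × Nat)) (p0 : pvT × Nat)
    (hf : P.find? (fun p => (!used.getD p.2 false) && (p.1.2.1 == key)) = some p0)
    (hlt : p0.2 < used.length) (hnd : (P.map Prod.snd).Nodup) :
    (P.filter (fun p => !(used.set p0.2 true).getD p.2 false)).map Prod.fst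
      = ((P.filter (fun p => !used.getD p.2 false)).map Prod.fst).erase p0.1 := by
  induction P with
  | nil => simp at hf
  | cons p P ih =>
    simp only [List.map_cons, List.nodup_cons] at hnd
    by_cases hp : ((!used.getD p.2 false) && (p.1.2.1 == key)) = true
    · rw [List.find?_cons_of_pos
        (p := fun q : pvT × Nat => (!used.getD q.2 false) && (q.1.2.1 == key)) hp] at hf
      obtain rfl := Option.some.inj hf
      rw [Bool.and_eq_true] at hp
      obtain ⟨h1, _⟩ := hp
      rw [List.filter_cons_of_pos (p := fun q : pvT × Nat => !used.getD q.2 false) h1,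
        List.map_cons, List.erase_cons_head,
        List.filter_cons_of_neg (p := fun q : pvT × Nat => !(used.set p.2 true).getD q.2 false)
          (by simp [List.getD_eq_getElem?_getD, hlt])]
      apply congrArg
      apply List.filter_congr
      intro q hq
      have hne : p.2 ≠ q.2 := fun h => hnd.1 (h ▸ List.mem_map_of_mem hq)
      simp [List.getD_eq_getElem?_getD, hne]
    · rw [List.find?_cons_of_neg
        (p := fun q : pvT × Nat => (!used.getD q.2 false) && (q.1.2.1 == key)) hp] at hf
      have hmem := List.mem_of_find?_eq_some hf
      have hne : p0.2 ≠ p.2 := fun h => hnd.1 (h ▸ List.mem_map_of_mem hmem)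
      have hgd : (used.set p0.2 true).getD p.2 false = used.getD p.2 false := by
        simp [List.getD_eq_getElem?_getD, hne]
      by_cases hu : used.getD p.2 false = true
      · have hu2 : (used.set p0.2 true).getD p.2 false = true := hgd.trans hu
        simp only [List.getD_eq_getElem?_getD] at hu hu2
        rw [List.filter_cons_of_neg (p := fun q : pvT × Nat => !used.getD q.2 false) (by simp [hu]),
          List.filter_cons_of_neg (p := fun q : pvT × Nat => !(used.set p0.2 true).getD q.2 false)
            (by simp [hu2])]
        exact ih hf hnd.2
      · replace hu : used.getD p.2 false = false := by
          cases h : used.getD p.2 false <;> simp_all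
        simp only [List.getD_eq_getElem?_getD] at hu hgd
        have hkm : p.1.2.1 ≠ key := by
          intro h
          exact hp (by simp [hu, h])
        have hp0 := List.find?_some hf
        rw [Bool.and_eq_true] at hp0
        have hp0key : p0.1.2.1 = key := by simpa using hp0.2
        have hne1 : ¬(p.1 == p0.1) = true := by
          simp only [beq_iff_eq]
          intro h
          exact hkm (by rw [h, hp0key])
        have hu2 : (used.set p0.2 true)[p.2]?.getD false = false := hgd.trans hu
        rw [List.filter_cons_of_pos (p := fun q : pvT × Nat => !used.getD q.2 false) (by simp [hu]),
          List.filter_cons_of_pos (p := fun q : pvT × Nat => !(used.set p0.2 true).getD q.2 false)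
            (by simp [hu2]),
          List.map_cons, List.map_cons, List.erase_cons_tail hne1]
        exact congrArg (p.1 :: ·) (ih hf hnd.2)

theorem pvZipIdx_snd_nodup (ts : List pvT) : (ts.zipIdx.map Prod.snd).Nodup := by
  rw [List.zipIdx_map_snd]
  exact List.nodup_range' 1

theorem pvRem_len_le (ts : List pvT) (used : List Bool) :
    (pvRem ts used).length ≤ ts.length := by
  unfold pvRem
  calc (List.map Prod.fst (ts.zipIdx.filter (fun p => !used.getD p.2 false))).length
      = (ts.zipIdx.filter (fun p => !used.getD p.2 false)).length := List.length_map ..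
    _ ≤ ts.zipIdx.length := List.length_filter_le ..
    _ = ts.length := List.length_zipIdx

theorem pvFindSeed (ts : List pvT) (used : List Bool) (i : Nat) (hi : i < ts.length)
    (hu : used.getD i false = false) (hall : ∀ j, j < i → used.getD j false = true) :
    ts.zipIdx.find? (fun p => !used.getD p.2 false) = some (ts[i], i) := by
  have hlen_take : (ts.take i).length = i := by simp; omega
  have hsplit : ts.zipIdx = (ts.take i).zipIdx ++ ((ts.drop i).zipIdx (0 + (ts.take i).length)) := by
    conv_lhs => rw [← List.take_append_drop i ts]
    exact List.zipIdx_append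
  rw [hsplit, List.find?_append]
  have h1 : (ts.take i).zipIdx.find? (fun p => !used.getD p.2 false) = none := by
    rw [List.find?_eq_none]
    intro x hx
    have hb := List.mem_zipIdx (x := x.1) (i := x.2) (by simpa using hx)
    have hx2 : x.2 < i := by omega
    have h := hall x.2 hx2
    simp only [List.getD_eq_getElem?_getD] at h
    simp [h]
  rw [h1]
  have h2 : ts.drop i = ts[i] :: ts.drop (i + 1) := List.drop_eq_getElem_cons hi
  have hu' := hu
  simp only [List.getD_eq_getElem?_getD] at hu'
  rw [h2, List.zipIdx_cons, List.find?_cons_of_pos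
    (p := fun p : pvT × Nat => !used.getD p.2 false) (by simp [hlen_take, hu'])]
  simp [hlen_take]

theorem pvRem_replicate (ts : List pvT) :
    pvRem ts (List.replicate ts.length false) = ts := by
  unfold pvRem
  rw [List.filter_eq_self.mpr, List.zipIdx_map_fst]
  intro p _
  simp [List.getD_eq_getElem?_getD, List.getElem?_replicate]
  split <;> simp

theorem pvRem_all_used (ts : List pvT) (used : List Bool)
    (h : ∀ j, j < ts.length → used.getD j false = true) : pvRem ts used = [] := by
  unfold pvRem
  rw [List.filter_eq_nil_iff.mpr]
  · rfl
  · intro p hp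
    have hb := List.mem_zipIdx (x := p.1) (i := p.2) (by simpa using hp)
    have := h p.2 (by omega)
    simp only [List.getD_eq_getElem?_getD] at this ⊢
    simp [this]

theorem pvInner_sim (ts : List pvT) (fuel : Nat) :
    ∀ (chain : pvChain) (key : List Int) (pos : PySem.Dict (List Int) Nat) (used : List Bool),
    used.length = ts.length → pvPosInv ts pos used → (pvRem ts used).length ≤ fuel →
    (pvInnerB ts (pvBuckets ts) fuel chain key pos used).1 = (pvInnerA chain key (pvRem ts used)).1 ∧
    (pvInnerA chain key (pvRem ts used)).2 = pvRem ts (pvInnerB ts (pvBuckets ts) fuel chain key pos used).2.2 ∧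
    (pvInnerB ts (pvBuckets ts) fuel chain key pos used).2.2.length = ts.length ∧
    pvPosInv ts (pvInnerB ts (pvBuckets ts) fuel chain key pos used).2.1 (pvInnerB ts (pvBuckets ts) fuel chain key pos used).2.2 ∧
    (∀ x, used.getD x false = true → (pvInnerB ts (pvBuckets ts) fuel chain key pos used).2.2.getD x false = true) := by
  induction fuel with
  | zero =>
    intro chain key pos used hlen hinv hfuel
    have hR : pvRem ts used = [] := List.eq_nil_of_length_eq_zero (by omega)
    have hA : pvInnerA chain key (pvRem ts used) = (chain, pvRem ts used) := by
      rw [hR]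
      rw [pvInnerA]
      split
      · rfl
      · next m heq => simp at heq
    simp only [pvInnerB]
    rw [hA]
    exact ⟨rfl, rfl, hlen, hinv, fun x h => h⟩
  | succ fuel ih =>
    intro chain key pos used hlen hinv hfuel
    have hfps := pvTake_spec ts pos used key hinv hlen
    have hfbkt := pvFind_bkt ts used key
    have hfrem := pvFind_rem ts used key
    cases hF : ts.zipIdx.find? (fun p => (!used.getD p.2 false) && (p.1.2.1 == key)) with
    | none =>
      rw [hF, Option.map_none] at hfbkt hfrem
      rw [hfbkt] at hfps
      obtain ⟨htake, hinv'⟩ := hfps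
      have hA : pvInnerA chain key (pvRem ts used) = (chain, pvRem ts used) := by
        rw [pvInnerA]
        split
        · rfl
        · next m heq => rw [hfrem] at heq; simp at heq
      have hB : pvInnerB ts (pvBuckets ts) (fuel + 1) chain key pos used
          = (chain, (pvTake (pvBuckets ts) pos used key).2.1, used) := by
        simp only [pvInnerB]
        rw [htake]
      rw [hA, hB]
      exact ⟨rfl, rfl, hlen, hinv', fun x h => h⟩
    | some pstar =>
      rw [hF, Option.map_some] at hfbkt hfrem
      rw [hfbkt] at hfps
      obtain ⟨htake, hunused, hinv'⟩ := hfps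
      have hmemz : pstar ∈ ts.zipIdx := List.mem_of_find?_eq_some hF
      have hb := List.mem_zipIdx (x := pstar.1) (i := pstar.2) (by simpa using hmemz)
      have hjlt : pstar.2 < ts.length := by omega
      have hts : ts[pstar.2] = pstar.1 := by
        have := hb.2.2
        simp only [Nat.sub_zero] at this
        exact this.symm
      have hgetd : ts.getD pstar.2 ("", [], []) = pstar.1 := by
        rw [List.getD_eq_getElem ts _ hjlt, hts]
      have hmemR : pstar.1 ∈ pvRem ts used := List.mem_of_find?_eq_some hfrem
      have hA : pvInnerA chain key (pvRem ts used) =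
          pvInnerA (chain.insert pstar.1.1 (pvEntry pstar.1)) pstar.1.2.2
            ((pvRem ts used).erase pstar.1) := by
        conv_lhs => rw [pvInnerA]
        split
        · next heq => rw [hfrem] at heq; simp at heq
        · next m heq =>
          rw [hfrem] at heq
          obtain rfl := Option.some.inj heq
          simp [PySem.List.remove?_eq_some_erase _ _ hmemR]
      have hRE : pvRem ts (used.set pstar.2 true) = (pvRem ts used).erase pstar.1 :=
        pvErase used key ts.zipIdx pstar hF (by omega) (pvZipIdx_snd_nodup ts)
      have hlenR' : (pvRem ts (used.set pstar.2 true)).length ≤ fuel := by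
        rw [hRE, List.length_erase_of_mem hmemR]
        have := List.length_pos_of_mem hmemR
        omega
      have hB : pvInnerB ts (pvBuckets ts) (fuel + 1) chain key pos used
          = pvInnerB ts (pvBuckets ts) fuel (chain.insert pstar.1.1 (pvEntry pstar.1))
              pstar.1.2.2 (pvTake (pvBuckets ts) pos used key).2.1 (used.set pstar.2 true) := by
        simp only [pvInnerB]
        rw [htake]
        have hgetd' : ts[pstar.2]?.getD ("", [], []) = pstar.1 := by
          rw [List.getElem?_eq_getElem hjlt]
          simp [hts]
        simp [hgetd']
      obtain ⟨ih1, ih2, ih3, ih4, ih5⟩ := ih (chain.insert pstar.1.1 (pvEntry pstar.1))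
        pstar.1.2.2 (pvTake (pvBuckets ts) pos used key).2.1 (used.set pstar.2 true)
        (by simp [hlen]) hinv' hlenR'
      rw [hA, hB, ← hRE]
      exact ⟨ih1, ih2, ih3, ih4, fun x hx => ih5 x (pvGetD_set_mono used pstar.2 x hx)⟩

theorem pvOuter_sim (ts : List pvT) (k : Nat) :
    ∀ (i : Nat) (pos : PySem.Dict (List Int) Nat) (used : List Bool)
      (chains : List (List (String × List (String × List Int)))),
    ts.length - i ≤ k → used.length = ts.length → pvPosInv ts pos used →
    (∀ j, j < i → used.getD j false = true) →
    pvOuterB ts (pvBuckets ts) i pos used chains = chains ++ pvOuterA (pvRem ts used) := by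
  induction k with
  | zero =>
    intro i pos used chains hk hlen hinv hall
    rw [pvOuterB, dif_neg (by omega)]
    rw [pvRem_all_used ts used (fun j hj => hall j (by omega))]
    rw [pvOuterA]
    simp
  | succ k ih =>
    intro i pos used chains hk hlen hinv hall
    by_cases hi : i < ts.length
    · by_cases hu : used.getD i false = true
      · rw [pvOuterB, dif_pos hi, if_pos hu]
        exact ih (i + 1) pos used chains (by omega) hlen hinv
          (fun j hj => by
            rcases Nat.lt_or_ge j i with h | h
            · exact hall j h
            · have : j = i := by omega
              subst this; exact hu)
      · replace hu : used.getD i false = false := by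
          cases h : used.getD i false <;> simp_all
        have hfs := pvFindSeed ts used i hi hu hall
        have hseed : pvRem ts used = ts[i] :: pvRem ts (used.set i true) :=
          pvSeed used ts.zipIdx (ts[i], i) hfs (by omega) (pvZipIdx_snd_nodup ts)
        have hinv2 : pvPosInv ts pos (used.set i true) := fun key =>
          ⟨(hinv key).1, fun q hq hlt => pvGetD_set_mono used i _ ((hinv key).2 q hq hlt)⟩
        have hlen2 : (used.set i true).length = ts.length := by simp [hlen]
        obtain ⟨s1, s2, s3, s4, s5⟩ := pvInner_sim ts ts.length
          ((PySem.Dict.empty).insert (ts[i]).1 (pvEntry (ts[i]))) (ts[i]).2.2 pos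
          (used.set i true) hlen2 hinv2 (pvRem_len_le ts _)
        have hAo : pvOuterA (pvRem ts used) =
            (pvInnerA ((PySem.Dict.empty).insert (ts[i]).1 (pvEntry (ts[i]))) (ts[i]).2.2
              (pvRem ts (used.set i true))).1.items ::
            pvOuterA (pvInnerA ((PySem.Dict.empty).insert (ts[i]).1 (pvEntry (ts[i]))) (ts[i]).2.2
              (pvRem ts (used.set i true))).2 := by
          rw [hseed, pvOuterA]
        have hall2 : ∀ j, j < i + 1 →
            (pvInnerB ts (pvBuckets ts) ts.length
              ((PySem.Dict.empty).insert (ts[i]).1 (pvEntry (ts[i]))) (ts[i]).2.2 pos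
              (used.set i true)).2.2.getD j false = true := by
          intro j hj
          rcases Nat.lt_or_ge j i with h | h
          · exact s5 j (pvGetD_set_mono used i j (hall j h))
          · have hji : j = i := by omega
            apply s5
            rw [hji]
            have hiu : i < used.length := by omega
            simp [List.getD_eq_getElem?_getD, hiu]
        rw [pvOuterB, dif_pos hi, if_neg (by rw [hu]; simp)]
        rw [ih (i + 1) _ _ _ (by omega) s3 s4 hall2]
        rw [hAo, ← s2, s1]
        simp
    · rw [pvOuterB, dif_neg hi]
      rw [pvRem_all_used ts used (fun j hj => hall j (by omega))]
      rw [pvOuterA]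
      simp

-- ===== VERDICT (by name: the statement is the Claim_ definition above) =====
theorem build_linked_chains_spec : Claim_equal_build_linked_chains := by
  intro ts _
  unfold Spec_build_linked_chains build_linked_chains build_linked_chains_alt
  have h := pvOuter_sim ts ts.length 0 (pvPos0 (pvBuckets ts))
      (List.replicate ts.length false) [] (by omega) (by simp)
      (by
        intro key
        constructor
        · simp [pvPos0_getD]
        · intro q hq hlt; simp [pvPos0_getD] at hlt)
      (by intro j hj; omega)
  simp only [List.nil_append, pvRem_replicate] at h
  exact h.symm
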